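-- pv_equiv track=rewrite | github.com/peleg2312/kuparashit-ui-897 | backend/app.py | build_team_access_map
-- ===== SOURCE A (Python) =====
-- TEAM_PERMISSION_FLAGS = {
--     "BLOCK": "isBlock",
--     "NASA": "isNasa",
--     "Shimiada": "isShimiada",
--     "Vans": "isStorageAdmin",
--     "Virtu": "isVirualizationAdmin",
--     "Team49": "is49Client",
--     "Orca": "isOrcaAdmin",
-- }
--
-- def build_team_access_map(team_list: list[str]) -> dict[str, bool]:
--     if not TEAM_PERMISSION_FLAGS:
--         return {}
--     enabled = {str(team).strip() for team in team_list if str(team).strip()}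
--     return {
--         flag: team in enabled
--         for team, flag in TEAM_PERMISSION_FLAGS.items()
--     }
-- ===== SOURCE B (Python) =====
-- TEAM_PERMISSION_FLAGS = {
--     "BLOCK": "isBlock",
--     "NASA": "isNasa",
--     "Shimiada": "isShimiada",
--     "Vans": "isStorageAdmin",
--     "Virtu": "isVirualizationAdmin",
--     "Team49": "is49Client",
--     "Orca": "isOrcaAdmin",
-- }
--
-- def build_team_access_map(team_list: list[str]) -> dict[str, bool]:
--     result = {flag: False for flag in TEAM_PERMISSION_FLAGS.values()}
--     for team in team_list:
--         t = str(team).strip()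
--         if t and t in TEAM_PERMISSION_FLAGS:
--             result[TEAM_PERMISSION_FLAGS[t]] = True
--     return result
-- ===== Notes on version B (the rewrite author's own statement) =====
-- stated objective: alternative
-- what changed: B builds no membership set: it seeds the result dict with every flag False and makes a single pass over team_list, flipping the matching flag to True via a direct TEAM_PERMISSION_FLAGS lookup, instead of A's set comprehension over team_list followed by a membership-testing dict comprehension over the flags.
import Mathlib
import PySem

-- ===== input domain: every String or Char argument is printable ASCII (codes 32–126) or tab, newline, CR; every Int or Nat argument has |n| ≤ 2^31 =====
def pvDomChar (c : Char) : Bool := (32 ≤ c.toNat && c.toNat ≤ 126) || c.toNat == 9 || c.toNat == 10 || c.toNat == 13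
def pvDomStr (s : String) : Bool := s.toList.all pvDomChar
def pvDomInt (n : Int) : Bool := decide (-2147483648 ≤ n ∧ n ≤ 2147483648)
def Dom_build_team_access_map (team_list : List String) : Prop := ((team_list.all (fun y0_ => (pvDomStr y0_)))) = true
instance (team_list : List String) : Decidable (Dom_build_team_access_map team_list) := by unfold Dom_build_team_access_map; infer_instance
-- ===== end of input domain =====

-- B replaces A's set comprehension + membership-map with a False-seeded dict updated in one pass over team_list (objective: alternative decomposition, same cost).

-- module constant TEAM_PERMISSION_FLAGS (insertion order), shared data for both ports
def teamFlags : List (String × String) :=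
  [("BLOCK", "isBlock"), ("NASA", "isNasa"), ("Shimiada", "isShimiada"),
   ("Vans", "isStorageAdmin"), ("Virtu", "isVirualizationAdmin"),
   ("Team49", "is49Client"), ("Orca", "isOrcaAdmin")]

-- ===== PORT A =====
def build_team_access_map (team_list : List String) : List (String × Bool) :=
  if teamFlags.isEmpty then []
  else
    let enabled : PySem.Set String :=
      PySem.Set.ofList ((team_list.map (fun team => PySem.Str.strip team)).filter (fun t => !(t == "")))
    teamFlags.map (fun p => (p.2, decide (p.1 ∈ enabled)))

-- ===== PORT B =====
def build_team_access_map_alt (team_list : List String) : List (String × Bool) :=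
  let flagsD : PySem.Dict String String := PySem.Dict.mk teamFlags
  let init : PySem.Dict String Bool :=
    PySem.Dict.ofList (teamFlags.map (fun p => (p.2, false)))
  (team_list.foldl (fun d team =>
      let t := PySem.Str.strip team
      if t == "" then d
      else match flagsD.get? t with
        | some flag => d.insert flag true
        | none => d) init).items

-- ===== PRECONDITION & SPEC =====
def Spec_build_team_access_map (team_list : List String) (out : List (String × Bool)) : Prop := out = build_team_access_map_alt team_list
instance (team_list : List String) (out : List (String × Bool)) : Decidable (Spec_build_team_access_map team_list out) := by unfold Spec_build_team_access_map; infer_instance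

-- ===== CLAIM (what is proved, stated in full; the proofs are below) =====
def Claim_equal_build_team_access_map : Prop := ∀ (team_list : List String), Dom_build_team_access_map team_list → Spec_build_team_access_map team_list (build_team_access_map team_list)

-- ===== LEMMAS AND PROOFS =====

-- the B-side dict state as a vector of 7 booleans, one per flag, in insertion order
def mkVec (b1 b2 b3 b4 b5 b6 b7 : Bool) : PySem.Dict String Bool :=
  PySem.Dict.mk [("isBlock", b1), ("isNasa", b2), ("isShimiada", b3),
    ("isStorageAdmin", b4), ("isVirualizationAdmin", b5), ("is49Client", b6), ("isOrcaAdmin", b7)]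

def stepB (d : PySem.Dict String Bool) (team : String) : PySem.Dict String Bool :=
  let t := PySem.Str.strip team
  if t == "" then d
  else match (PySem.Dict.mk teamFlags).get? t with
    | some flag => d.insert flag true
    | none => d

lemma stepB_mkVec (b1 b2 b3 b4 b5 b6 b7 : Bool) (team : String) :
    stepB (mkVec b1 b2 b3 b4 b5 b6 b7) team =
      mkVec (b1 || (PySem.Str.strip team == "BLOCK")) (b2 || (PySem.Str.strip team == "NASA"))
        (b3 || (PySem.Str.strip team == "Shimiada")) (b4 || (PySem.Str.strip team == "Vans"))
        (b5 || (PySem.Str.strip team == "Virtu")) (b6 || (PySem.Str.strip team == "Team49"))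
        (b7 || (PySem.Str.strip team == "Orca")) := by
  unfold stepB
  rcases eq_or_ne (PySem.Str.strip team) "" with h | h0
  · rw [h]; simp [mkVec]
  rcases eq_or_ne (PySem.Str.strip team) "BLOCK" with h | h1
  · rw [h]; simp [mkVec, teamFlags, PySem.Dict.get?, PySem.Dict.insert]
  rcases eq_or_ne (PySem.Str.strip team) "NASA" with h | h2
  · rw [h]; simp [mkVec, teamFlags, PySem.Dict.get?, PySem.Dict.insert]
  rcases eq_or_ne (PySem.Str.strip team) "Shimiada" with h | h3
  · rw [h]; simp [mkVec, teamFlags, PySem.Dict.get?, PySem.Dict.insert]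
  rcases eq_or_ne (PySem.Str.strip team) "Vans" with h | h4
  · rw [h]; simp [mkVec, teamFlags, PySem.Dict.get?, PySem.Dict.insert]
  rcases eq_or_ne (PySem.Str.strip team) "Virtu" with h | h5
  · rw [h]; simp [mkVec, teamFlags, PySem.Dict.get?, PySem.Dict.insert]
  rcases eq_or_ne (PySem.Str.strip team) "Team49" with h | h6
  · rw [h]; simp [mkVec, teamFlags, PySem.Dict.get?, PySem.Dict.insert]
  rcases eq_or_ne (PySem.Str.strip team) "Orca" with h | h7
  · rw [h]; simp [mkVec, teamFlags, PySem.Dict.get?, PySem.Dict.insert]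
  · simp [mkVec, teamFlags, PySem.Dict.get?, h0, h1, h2, h3, h4, h5, h6, h7,
      Ne.symm h1, Ne.symm h2, Ne.symm h3, Ne.symm h4, Ne.symm h5, Ne.symm h6, Ne.symm h7]

lemma foldB_mkVec (tl : List String) (b1 b2 b3 b4 b5 b6 b7 : Bool) :
    tl.foldl stepB (mkVec b1 b2 b3 b4 b5 b6 b7) =
      mkVec (b1 || tl.any (fun s => PySem.Str.strip s == "BLOCK"))
        (b2 || tl.any (fun s => PySem.Str.strip s == "NASA"))
        (b3 || tl.any (fun s => PySem.Str.strip s == "Shimiada"))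
        (b4 || tl.any (fun s => PySem.Str.strip s == "Vans"))
        (b5 || tl.any (fun s => PySem.Str.strip s == "Virtu"))
        (b6 || tl.any (fun s => PySem.Str.strip s == "Team49"))
        (b7 || tl.any (fun s => PySem.Str.strip s == "Orca")) := by
  induction tl generalizing b1 b2 b3 b4 b5 b6 b7 with
  | nil => simp
  | cons x xs ih =>
    rw [List.foldl_cons, stepB_mkVec, ih]
    simp [Bool.or_assoc]

lemma mem_enabled_iff (tl : List String) (k : String) (hk : k ≠ "") :
    decide (k ∈ PySem.Set.ofList ((tl.map (fun team => PySem.Str.strip team)).filter (fun t => !(t == "")))) =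
      tl.any (fun s => PySem.Str.strip s == k) := by
  rw [Bool.eq_iff_iff]
  simp only [decide_eq_true_eq, PySem.Set.mem_ofList, List.mem_filter, List.mem_map,
    List.any_eq_true]
  constructor
  · rintro ⟨⟨s, hs, rfl⟩, _⟩
    exact ⟨s, hs, by simp⟩
  · rintro ⟨s, hs, h⟩
    have : PySem.Str.strip s = k := by simpa using h
    exact ⟨⟨s, hs, this⟩, by simp [hk]⟩

-- ===== VERDICT (by name: the statement is the Claim_ definition above) =====
theorem build_team_access_map_spec : Claim_equal_build_team_access_map := by
  intro tl _
  show build_team_access_map tl = build_team_access_map_alt tl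
  have hB : build_team_access_map_alt tl
      = (tl.foldl stepB (mkVec false false false false false false false)).items := rfl
  rw [hB, foldB_mkVec]
  simp only [build_team_access_map]
  rw [if_neg (by decide)]
  simp only [teamFlags, List.map_cons, List.map_nil]
  rw [mem_enabled_iff tl "BLOCK" (by decide), mem_enabled_iff tl "NASA" (by decide),
    mem_enabled_iff tl "Shimiada" (by decide), mem_enabled_iff tl "Vans" (by decide),
    mem_enabled_iff tl "Virtu" (by decide), mem_enabled_iff tl "Team49" (by decide),
    mem_enabled_iff tl "Orca" (by decide)]
  rfl
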